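-- pv_equiv track=rewrite | github.com/OliOliOliverPan/Advent-of-Code-2024 | Solutions/Day19.py | day19Q1
-- ===== SOURCE A (Python) =====
-- def day19Q1(towel_patterns, designs):
--     results = []
--
--     for design in designs:
--         n = len(design)
--         dp = [False] * (n+1)
--         dp[0] = True # Base case: empty prefix is always achievable
--
--         for i in range(1, n+1):
--             for pattern in towel_patterns:
--                 pattern_len = len(pattern)
--                 if i>= pattern_len and design[i-pattern_len:i] == pattern:
--                     dp[i] = dp[i] or dp[i-pattern_len]
--
--         results.append(dp[n]) # Can the whole design be formed?
--
--     return sum(results)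
-- ===== SOURCE B (Python) =====
-- def day19Q1(towel_patterns, designs):
--     # Build a trie of the towel patterns once; for each design, walk the trie
--     # from every reachable position, marking the position after each pattern
--     # end found along the walk; count designs whose end becomes reachable.
--     # Trie node = dict mapping char -> [is_end_of_pattern, child_node].
--     root = {}
--     for p in towel_patterns:
--         node = root
--         entry = None
--         for ch in p:
--             if ch not in node:
--                 node[ch] = [False, {}]
--             entry = node[ch]
--             node = entry[1]
--         if entry is not None:  # nonempty pattern: mark its last char
--             entry[0] = True
--     total = 0
--     for design in designs:
--         n = len(design)
--         reach = [False] * (n + 1)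
--         reach[0] = True
--         for i in range(n):
--             if reach[i]:
--                 node = root
--                 j = i
--                 while j < n and design[j] in node:
--                     is_end, node = node[design[j]]
--                     j += 1
--                     if is_end:
--                         reach[j] = True
--         total += reach[n]
--     return total
-- ===== Notes on version B (the rewrite author's own statement) =====
-- stated objective: faster
-- what changed: Replaces the per-position scan over all patterns with slicing by a trie of the patterns built once: from each reachable position one walk down the trie finds every matching pattern at once, so the inner loop over patterns and all slice comparisons disappear.
import Mathlib
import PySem

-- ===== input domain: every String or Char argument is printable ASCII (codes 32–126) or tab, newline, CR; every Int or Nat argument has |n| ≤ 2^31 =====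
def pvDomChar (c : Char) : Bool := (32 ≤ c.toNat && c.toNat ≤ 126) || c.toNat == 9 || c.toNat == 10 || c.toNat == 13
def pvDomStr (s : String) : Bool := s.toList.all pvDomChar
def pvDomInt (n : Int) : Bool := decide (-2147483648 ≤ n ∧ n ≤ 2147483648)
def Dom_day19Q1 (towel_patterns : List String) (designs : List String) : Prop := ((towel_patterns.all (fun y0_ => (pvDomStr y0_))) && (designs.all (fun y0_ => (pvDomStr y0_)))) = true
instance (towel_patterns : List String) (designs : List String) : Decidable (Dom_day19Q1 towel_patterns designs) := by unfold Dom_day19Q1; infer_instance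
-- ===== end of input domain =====

-- B replaces A's per-position scan over all patterns (with slicing) by a trie of the
-- patterns built once: one trie walk per reachable position finds all matches at once.

-- ===== PORT A =====
-- inner 'for pattern in towel_patterns' body at position i (dp[i] = dp[i] or dp[i-pl] on a slice match)
def stepA (ps : List (List Char)) (s : List Char) (dp : List Bool) (i : Int) : List Bool :=
  ps.foldl (fun dp p =>
    if ((p.length : Int) ≤ i ∧ PySem.List.slice s (some (i - p.length)) (some i) = p)
    then PySem.List.pySetD dp i
           (PySem.List.pyGetD dp i false || PySem.List.pyGetD dp (i - p.length) false)
    else dp) dp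

-- the per-design dp table after 'for i in range(1, n+1)'
def dpA (ps : List (List Char)) (s : List Char) : List Bool :=
  (PySem.List.pyRange 1 ((s.length : Int) + 1) 1).foldl (stepA ps s)
    (PySem.List.pySetD (List.replicate (s.length + 1) false) 0 true)

def day19Q1 (towel_patterns : List String) (designs : List String) : Int :=
  let ps := towel_patterns.map String.toList
  let results := designs.foldl (fun res d =>
    res ++ [PySem.List.pyGetD (dpA ps d.toList) (d.toList.length : Int) false]) []
  results.foldl (fun acc b => acc + (if b then (1 : Int) else 0)) 0

-- ===== PORT B =====
-- Source B's trie node dict {char: [is_end, child]} is represented first-child/next-sibling: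
-- a PTrie value is the sibling chain of one node's entries, in insertion order.
inductive PTrie : Type
  | nil : PTrie
  | node : Char → Bool → PTrie → PTrie → PTrie
deriving DecidableEq, Repr

-- Source B's per-pattern insertion loop (walk/create entries; mark the last char's entry)
def trieInsert (t : PTrie) (w : List Char) : PTrie :=
  match t, w with
  | t, [] => t
  | .nil, c :: cs => .node c cs.isEmpty (trieInsert .nil cs) .nil
  | .node c' e ch sib, c :: cs =>
      if c' = c then .node c' (e || cs.isEmpty) (trieInsert ch cs) sib
      else .node c' e ch (trieInsert sib (c :: cs))
termination_by (w.length, sizeOf t)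

-- 'design[j] in node' + 'node[design[j]]': first entry of the sibling chain with this char
def trieFind (t : PTrie) (c : Char) : Option (Bool × PTrie) :=
  match t with
  | .nil => none
  | .node c' e ch sib => if c' = c then some (e, ch) else trieFind sib c

-- Source B's inner while loop: walk the trie down the suffix, marking reach after each pattern end
def trieMark (reach : List Bool) (t : PTrie) (suf : List Char) (j : Nat) : List Bool :=
  match suf with
  | [] => reach
  | c :: rest =>
    match trieFind t c with
    | none => reach
    | some (e, ch) =>
      trieMark (if e then reach.set (j + 1) true else reach) ch rest (j + 1)

-- Source B's per-design loop 'for i in range(n)'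
def reachT (t : PTrie) (s : List Char) : List Bool :=
  (List.range s.length).foldl
    (fun r i => if r.getD i false then trieMark r t (s.drop i) i else r)
    ((List.replicate (s.length + 1) false).set 0 true)

def day19Q1_alt (towel_patterns : List String) (designs : List String) : Int :=
  let root := towel_patterns.foldl (fun t p => trieInsert t p.toList) .nil
  designs.foldl (fun total d =>
    total + (if (reachT root d.toList).getD d.toList.length false then 1 else 0)) 0

-- ===== PRECONDITION & SPEC =====
def Spec_day19Q1 (towel_patterns : List String) (designs : List String) (out : Int) : Prop := out = day19Q1_alt towel_patterns designs
instance (towel_patterns : List String) (designs : List String) (out : Int) : Decidable (Spec_day19Q1 towel_patterns designs out) := by unfold Spec_day19Q1; infer_instance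

-- ===== CLAIM (what is proved, stated in full; the proofs are below) =====
def Claim_equal_day19Q1 : Prop := ∀ (towel_patterns : List String) (designs : List String), Dom_day19Q1 towel_patterns designs → Spec_day19Q1 towel_patterns designs (day19Q1 towel_patterns designs)

-- ===== LEMMAS AND PROOFS =====

-- 't can be tiled by nonempty patterns of ps'
inductive Til (ps : List (List Char)) : List Char → Prop
  | nil : Til ps []
  | cons (p t : List Char) : p ∈ ps → p ≠ [] → Til ps t → Til ps (p ++ t)

theorem Til_snoc (ps : List (List Char)) (t p : List Char)
    (ht : Til ps t) (hp : p ∈ ps) (hne : p ≠ []) : Til ps (t ++ p) := by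
  induction ht with
  | nil => simpa using Til.cons p [] hp hne Til.nil
  | cons q u hq hqne _ ih => simpa using Til.cons q (u ++ p) hq hqne ih

theorem Til_last (ps : List (List Char)) (t : List Char) (ht : Til ps t) :
    t = [] ∨ ∃ t' p, p ∈ ps ∧ p ≠ [] ∧ t = t' ++ p ∧ Til ps t' := by
  induction ht with
  | nil => exact Or.inl rfl
  | cons q u hq hqne hu ih =>
    right
    rcases ih with h | ⟨t', p, hp, hpne, rfl, ht'⟩
    · exact ⟨[], q, hq, hqne, by simp [h], Til.nil⟩
    · exact ⟨q ++ t', p, hp, hpne, by simp, Til.cons q t' hq hqne ht'⟩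

-- 'take j is tileable' unfolded one (last) block
theorem til_take_iff (ps : List (List Char)) (s : List Char) (j : Nat)
    (hj : j ≤ s.length) (hj0 : j ≠ 0) :
    Til ps (s.take j) ↔ ∃ p ∈ ps, p ≠ [] ∧ p.length ≠ 0 ∧ p.length ≤ j ∧
      s.take j = s.take (j - p.length) ++ p ∧ Til ps (s.take (j - p.length)) := by
  constructor
  · intro ht
    rcases Til_last ps _ ht with h | ⟨t', p, hp, hpne, heq, ht'⟩
    · exfalso
      have : (s.take j).length = j := by simp [hj]
      rw [h] at this; simp at this; omega
    · have hlen : t'.length + p.length = j := by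
        have : (s.take j).length = j := by simp [hj]
        rw [heq] at this; simpa using this
      have hpl0 : p.length ≠ 0 := by simpa using hpne
      have ht'' : t' = s.take (j - p.length) := by
        have h1 : t' = (t' ++ p).take t'.length := (List.take_left ..).symm
        rw [← heq] at h1
        rw [h1, List.take_take]
        congr 1
        omega
      refine ⟨p, hp, hpne, hpl0, by omega, ?_, ?_⟩
      · rw [heq, ht'']
      · rw [← ht'']; exact ht'
  · rintro ⟨p, hp, hpne, hpl0, hple, heq, ht⟩
    rw [heq]; exact Til_snoc ps _ p ht hp hpne

-- slice match at position i ↔ prefix extension by p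
theorem slice_eq_iff (s p : List Char) (i : Nat) (hpi : p.length ≤ i) (_hin : i ≤ s.length) :
    (PySem.List.slice s (some ((i : Int) - p.length)) (some (i : Int)) = p ↔
      s.take i = s.take (i - p.length) ++ p) := by
  have hc : (i : Int) - (p.length : Int) = ((i - p.length : Nat) : Int) := by omega
  rw [hc, PySem.List.slice_natCast]
  have h2 : i - (i - p.length) = p.length := by omega
  rw [h2]
  have ht : s.take i = s.take (i - p.length) ++ (s.drop (i - p.length)).take p.length := by
    have hsum : i - p.length + p.length = i := by omega
    have h3 := List.take_add (l := s) (i := i - p.length) (j := p.length)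
    rwa [hsum] at h3
  constructor
  · intro h; rw [ht, h]
  · intro h
    have := ht.symm.trans h
    exact List.append_cancel_left this

theorem getD_set_bool (l : List Bool) (m j : Nat) (v : Bool) (hm : m < l.length) :
    (l.set m v).getD j false = if j = m then v else l.getD j false := by
  by_cases h : j = m
  · subst h; simp [List.getD_eq_getElem?_getD, hm]
  · simp [List.getD_eq_getElem?_getD, List.getElem?_set_ne (by omega : m ≠ j), h]

theorem init_getD (n j : Nat) :
    ((PySem.List.pySetD (List.replicate (n + 1) false) 0 true).getD j false = true) ↔ j = 0 := by
  rw [PySem.List.pySetD_of_nonneg _ _ (by norm_num)]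
  rw [getD_set_bool _ _ _ _ (by simp)]
  by_cases h : j = 0 <;> simp [h, List.getD_eq_getElem?_getD, List.getElem?_replicate]
  split <;> simp

theorem length_init (n : Nat) :
    (PySem.List.pySetD (List.replicate (n + 1) false) 0 true).length = n + 1 := by
  rw [PySem.List.pySetD_of_nonneg _ _ (by norm_num)]; simp

theorem length_stepA (ps : List (List Char)) (s : List Char) (dp : List Bool) (i : Int) :
    (stepA ps s dp i).length = dp.length := by
  induction ps generalizing dp with
  | nil => rfl
  | cons p ps ih =>
    simp only [stepA, List.foldl_cons] at *
    rw [ih]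
    split
    · exact PySem.List.length_pySetD ..
    · rfl

theorem stepA_getD (ps : List (List Char)) (s : List Char) (dp : List Bool) (k : Nat)
    (hlen : dp.length = s.length + 1) (hk : k + 1 ≤ s.length) (j : Nat) (_hj : j ≤ s.length) :
    ((stepA ps s dp ((k : Int) + 1)).getD j false = true) ↔
      (dp.getD j false = true ∨ (j = k + 1 ∧ ∃ p ∈ ps, p.length ≤ k + 1 ∧
        PySem.List.slice s (some (((k : Int) + 1) - p.length)) (some ((k : Int) + 1)) = p ∧
        dp.getD (k + 1 - p.length) false = true)) := by
  induction ps generalizing dp with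
  | nil => simp [stepA]
  | cons p ps ih =>
    rw [show stepA (p :: ps) s dp ((k : Int) + 1) = stepA ps s
        (if ((p.length : Int) ≤ (k : Int) + 1 ∧
            PySem.List.slice s (some (((k : Int) + 1) - (p.length : Int))) (some ((k : Int) + 1)) = p)
         then PySem.List.pySetD dp ((k : Int) + 1)
                (PySem.List.pyGetD dp ((k : Int) + 1) false ||
                 PySem.List.pyGetD dp (((k : Int) + 1) - (p.length : Int)) false)
         else dp) ((k : Int) + 1) from rfl]
    by_cases hC : ((p.length : Int) ≤ (k : Int) + 1 ∧
        PySem.List.slice s (some (((k : Int) + 1) - (p.length : Int))) (some ((k : Int) + 1)) = p)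
    · rw [if_pos hC]
      have hple : p.length ≤ k + 1 := by exact_mod_cast hC.1
      have hcast : ((k : Int) + 1) = ((k + 1 : Nat) : Int) := by push_cast; ring
      have hcast2 : ((k : Int) + 1) - (p.length : Int) = ((k + 1 - p.length : Nat) : Int) := by
        omega
      have hval : (PySem.List.pyGetD dp ((k : Int) + 1) false ||
          PySem.List.pyGetD dp (((k : Int) + 1) - (p.length : Int)) false)
          = (dp.getD (k + 1) false || dp.getD (k + 1 - p.length) false) := by
        rw [hcast2, hcast]; simp only [PySem.List.pyGetD_natCast]
      have hset : ∀ w : Bool, PySem.List.pySetD dp ((k : Int) + 1) w = dp.set (k + 1) w := by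
        intro w; rw [hcast, PySem.List.pySetD_natCast]
      rw [hval, hset]
      rw [ih (dp.set (k + 1) (dp.getD (k + 1) false || dp.getD (k + 1 - p.length) false))
        (by simp [hlen])]
      have hget : ∀ m : Nat,
          (dp.set (k + 1) (dp.getD (k + 1) false || dp.getD (k + 1 - p.length) false)).getD m false
            = if m = k + 1 then (dp.getD (k + 1) false || dp.getD (k + 1 - p.length) false)
              else dp.getD m false :=
        fun m => getD_set_bool dp (k + 1) m _ (by omega)
      by_cases hj' : j = k + 1
      · subst hj'
        rw [hget, if_pos rfl]
        constructor
        · rintro (h | ⟨-, q, hq, hqle, hqs, hqv⟩)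
          · rcases (by simpa using h :
                dp.getD (k + 1) false = true ∨ dp.getD (k + 1 - p.length) false = true) with h | h
            · exact Or.inl h
            · exact Or.inr ⟨rfl, p, List.mem_cons_self .., hple, hC.2, h⟩
          · by_cases h0 : q.length = 0
            · rw [h0] at hqv; simp only [Nat.sub_zero] at hqv
              rw [hget, if_pos rfl] at hqv
              rcases (by simpa using hqv :
                  dp.getD (k + 1) false = true ∨ dp.getD (k + 1 - p.length) false = true) with h | h
              · exact Or.inl h
              · exact Or.inr ⟨rfl, p, List.mem_cons_self .., hple, hC.2, h⟩
            · rw [hget, if_neg (by omega)] at hqv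
              exact Or.inr ⟨rfl, q, List.mem_cons_of_mem _ hq, hqle, hqs, hqv⟩
        · rintro (h | ⟨-, q, hq, hqle, hqs, hqv⟩)
          · exact Or.inl (by rw [h]; rfl)
          · rcases List.mem_cons.mp hq with heq | hq'
            · subst heq
              refine Or.inl ?_
              rw [hqv]
              simp
            · by_cases h0 : q.length = 0
              · refine Or.inr ⟨rfl, q, hq', hqle, hqs, ?_⟩
                rw [h0]; simp only [Nat.sub_zero]
                rw [hget, if_pos rfl]
                rw [h0] at hqv; simp only [Nat.sub_zero] at hqv
                rw [hqv, Bool.true_or]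
              · refine Or.inr ⟨rfl, q, hq', hqle, hqs, ?_⟩
                rw [hget, if_neg (by omega)]
                exact hqv
      · have hj2 : (dp.set (k + 1)
            (dp.getD (k + 1) false || dp.getD (k + 1 - p.length) false)).getD j false
            = dp.getD j false := by
          rw [hget, if_neg hj']
        rw [hj2]
        constructor
        · rintro (h | ⟨h, -⟩)
          · exact Or.inl h
          · exact absurd h hj'
        · rintro (h | ⟨h, -⟩)
          · exact Or.inl h
          · exact absurd h hj'
    · rw [if_neg hC]
      rw [ih dp hlen]
      constructor
      · rintro (h | ⟨hjk, q, hq, hrest⟩)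
        · exact Or.inl h
        · exact Or.inr ⟨hjk, q, List.mem_cons_of_mem _ hq, hrest⟩
      · rintro (h | ⟨hjk, q, hq, hqle, hqs, hqv⟩)
        · exact Or.inl h
        · rcases List.mem_cons.mp hq with heq | hq'
          · exact absurd ⟨by subst heq; exact_mod_cast hqle, by subst heq; exact hqs⟩ hC
          · exact Or.inr ⟨hjk, q, hq', hqle, hqs, hqv⟩

def dpAP (ps : List (List Char)) (s : List Char) (k : Nat) : List Bool :=
  (PySem.List.pyRange 1 ((k : Int) + 1) 1).foldl (stepA ps s)
    (PySem.List.pySetD (List.replicate (s.length + 1) false) 0 true)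

theorem length_dpAP (ps : List (List Char)) (s : List Char) (k : Nat) :
    (dpAP ps s k).length = s.length + 1 := by
  induction k with
  | zero =>
    unfold dpAP
    rw [show ((0 : Nat) : Int) + 1 = 1 from rfl, PySem.List.pyRange_one_eq_nil le_rfl]
    simp only [List.foldl_nil]
    exact length_init s.length
  | succ k ih =>
    unfold dpAP at *
    have hsplit : PySem.List.pyRange 1 (((k + 1 : Nat) : Int) + 1) 1 =
        PySem.List.pyRange 1 ((k : Int) + 1) 1 ++ [(k : Int) + 1] := by
      have : ((k + 1 : Nat) : Int) + 1 = ((k : Int) + 1) + 1 := by push_cast; ring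
      rw [this, PySem.List.pyRange_one_succ_right (by omega)]
    rw [hsplit, List.foldl_append, List.foldl_cons, List.foldl_nil, length_stepA, ih]

theorem dpAP_succ (ps : List (List Char)) (s : List Char) (k : Nat) :
    dpAP ps s (k + 1) = stepA ps s (dpAP ps s k) ((k : Int) + 1) := by
  unfold dpAP
  have hsplit : PySem.List.pyRange 1 (((k + 1 : Nat) : Int) + 1) 1 =
      PySem.List.pyRange 1 ((k : Int) + 1) 1 ++ [(k : Int) + 1] := by
    have : ((k + 1 : Nat) : Int) + 1 = ((k : Int) + 1) + 1 := by push_cast; ring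
    rw [this, PySem.List.pyRange_one_succ_right (by omega)]
  rw [hsplit, List.foldl_append, List.foldl_cons, List.foldl_nil]

theorem dpAP_inv (ps : List (List Char)) (s : List Char) (k : Nat) (hk : k ≤ s.length) :
    ∀ j, j ≤ s.length →
      (((dpAP ps s k).getD j false = true) ↔ (j ≤ k ∧ Til ps (s.take j))) := by
  induction k with
  | zero =>
    intro j hj
    unfold dpAP
    rw [show ((0 : Nat) : Int) + 1 = 1 from rfl, PySem.List.pyRange_one_eq_nil le_rfl,
      List.foldl_nil, init_getD]
    constructor
    · rintro rfl; exact ⟨le_rfl, by rw [List.take_zero]; exact Til.nil⟩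
    · rintro ⟨h, -⟩; omega
  | succ k ih =>
    intro j hj
    rw [dpAP_succ, stepA_getD ps s _ k (length_dpAP ps s k) (by omega) j hj]
    have ihk := ih (by omega)
    by_cases hj' : j = k + 1
    · subst hj'
      rw [ihk _ hj]
      constructor
      · rintro (⟨h, -⟩ | ⟨-, p, hp, hple, hps, hpv⟩)
        · omega
        · rw [ihk _ (by omega)] at hpv
          obtain ⟨hle, htil⟩ := hpv
          have hpl1 : 1 ≤ p.length := by omega
          have hpne : p ≠ [] := by
            intro h; rw [h] at hpl1; simp at hpl1
          have := (slice_eq_iff s p (k + 1) hple (by omega)).mp hps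
          refine ⟨le_rfl, ?_⟩
          rw [this]
          exact Til_snoc ps _ p htil hp hpne
      · rintro ⟨-, htil⟩
        rcases (til_take_iff ps s (k + 1) (by omega) (by omega)).mp htil with
          ⟨p, hp, hpne, hpl0, hple, heq, ht'⟩
        refine Or.inr ⟨rfl, p, hp, hple, ?_, ?_⟩
        · exact (slice_eq_iff s p (k + 1) hple (by omega)).mpr heq
        · rw [ihk _ (by omega)]
          exact ⟨by omega, ht'⟩
    · rw [ihk _ hj]
      constructor
      · rintro (⟨h, htil⟩ | ⟨h, -⟩)
        · exact ⟨by omega, htil⟩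
        · exact absurd h hj'
      · rintro ⟨h, htil⟩
        exact Or.inl ⟨by omega, htil⟩

-- B side: position j is marked after the first k outer iterations
def ReachP (ps : List (List Char)) (s : List Char) (k j : Nat) : Prop :=
  j = 0 ∨ ∃ i p, i < k ∧ p ∈ ps ∧ p ≠ [] ∧ i + p.length = j ∧
    s.take j = s.take i ++ p ∧ Til ps (s.take i)

theorem reachP_le (ps : List (List Char)) (s : List Char) (k j : Nat)
    (hj : j ≤ s.length) (hjk : j ≤ k) : (ReachP ps s k j ↔ Til ps (s.take j)) := by
  constructor
  · rintro (rfl | ⟨i, p, hik, hp, hpne, hipl, heq, htil⟩)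
    · simpa using Til.nil
    · rw [heq]; exact Til_snoc ps _ p htil hp hpne
  · intro htil
    by_cases hj0 : j = 0
    · exact Or.inl hj0
    · rcases (til_take_iff ps s j hj hj0).mp htil with ⟨p, hp, hpne, hpl0, hple, heq, ht'⟩
      exact Or.inr ⟨j - p.length, p, by omega, hp, hpne, by omega, heq, ht'⟩

theorem take_append_iff_prefix_drop (s p : List Char) (k j : Nat)
    (hkj : k + p.length = j) (_hj : j ≤ s.length) :
    (s.take j = s.take k ++ p ↔ p <+: s.drop k) := by
  have ht : s.take j = s.take k ++ (s.drop k).take p.length := by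
    rw [← hkj, List.take_add]
  constructor
  · intro h
    have := List.append_cancel_left (ht.symm.trans h)
    rw [List.prefix_iff_eq_take]
    exact this.symm
  · intro h
    rw [ht, ← List.prefix_iff_eq_take.mp h]

-- ===== trie lemmas (B side) =====

-- 'w is marked as a pattern end in the trie t'
def TMem (t : PTrie) (w : List Char) : Bool :=
  match w with
  | [] => false
  | c :: cs =>
    match trieFind t c with
    | none => false
    | some (e, ch) => if cs.isEmpty then e else TMem ch cs

theorem TMem_nil_trie (w : List Char) : TMem .nil w = false := by
  cases w <;> simp [TMem, trieFind]

theorem TMem_node_ne (c' : Char) (e : Bool) (ch sib : PTrie) (c : Char) (ws : List Char)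
    (h : ¬ c' = c) : TMem (.node c' e ch sib) (c :: ws) = TMem sib (c :: ws) := by
  simp only [TMem, trieFind, if_neg h]

theorem TMem_insert (t : PTrie) (p : List Char) :
    ∀ w, TMem (trieInsert t p) w = (TMem t w || (decide (w = p) && !p.isEmpty)) := by
  induction t, p using trieInsert.induct with
  | case1 t =>
    intro w
    simp [trieInsert]
  | case2 c cs ih =>
    intro w
    cases w with
    | nil => simp [trieInsert, TMem, TMem_nil_trie]
    | cons c'' ws =>
      by_cases hcc : c = c''
      · subst hcc
        rw [show trieInsert .nil (c :: cs) = .node c cs.isEmpty (trieInsert .nil cs) .nil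
            from by simp [trieInsert]]
        simp only [TMem, trieFind, if_pos rfl, TMem_nil_trie]
        cases ws with
        | nil =>
          simp only [List.isEmpty_nil, if_pos rfl, Bool.false_or]
          cases cs <;> simp
        | cons a as =>
          simp only [List.isEmpty_cons, Bool.false_eq_true, if_false]
          by_cases hw : (a :: as : List Char) = cs
          · subst hw
            simp [ih, TMem_nil_trie]
          · simp [ih, TMem_nil_trie, hw,
              show ¬((c :: a :: as : List Char) = c :: cs) from by simp [hw]]
      · rw [show trieInsert .nil (c :: cs) = .node c cs.isEmpty (trieInsert .nil cs) .nil
            from by simp [trieInsert]]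
        rw [TMem_node_ne _ _ _ _ _ _ hcc, TMem_nil_trie]
        simp [show ¬((c'' :: ws : List Char) = c :: cs) from by
          intro h; injection h with h1 _; exact hcc h1.symm]
  | case3 e ch sib c' cs ih =>
    intro w
    rw [show trieInsert (.node c' e ch sib) (c' :: cs)
        = .node c' (e || cs.isEmpty) (trieInsert ch cs) sib from by
      simp [trieInsert]]
    cases w with
    | nil => simp [TMem]
    | cons c'' ws =>
      by_cases hcc : c' = c''
      · subst hcc
        simp only [TMem, trieFind, if_pos rfl]
        cases ws with
        | nil =>
          simp only [List.isEmpty_nil, if_pos rfl]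
          cases cs <;> simp
        | cons a as =>
          simp only [List.isEmpty_cons, Bool.false_eq_true, if_false]
          by_cases hw : (a :: as : List Char) = cs
          · subst hw
            simp [ih]
          · simp [ih, hw, show ¬((c' :: a :: as : List Char) = c' :: cs) from by simp [hw]]
      · rw [TMem_node_ne _ _ _ _ _ _ hcc, TMem_node_ne _ _ _ _ _ _ hcc]
        simp [show ¬((c'' :: ws : List Char) = c' :: cs) from by
          intro h; injection h with h1 _; exact hcc h1.symm]
  | case4 c' e ch sib c cs hc ih =>
    intro w
    rw [show trieInsert (.node c' e ch sib) (c :: cs)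
        = .node c' e ch (trieInsert sib (c :: cs)) from by
      simp [trieInsert, hc]]
    cases w with
    | nil => simp [TMem]
    | cons c'' ws =>
      by_cases hcc : c' = c''
      · subst hcc
        simp only [TMem, trieFind, if_pos rfl]
        simp [show ¬((c' :: ws : List Char) = c :: cs) from by
          intro h; injection h with h1 _; exact hc h1]
      · rw [TMem_node_ne _ _ _ _ _ _ hcc, TMem_node_ne _ _ _ _ _ _ hcc, ih]

theorem TMem_foldl (ps : List (List Char)) :
    ∀ (t : PTrie) (w : List Char),
      TMem (ps.foldl trieInsert t) w = (TMem t w || (decide (w ∈ ps) && !w.isEmpty)) := by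
  induction ps with
  | nil => intro t w; simp
  | cons p ps ih =>
    intro t w
    simp only [List.foldl_cons, ih, TMem_insert]
    by_cases hw : w = p
    · subst hw
      simp only [decide_eq_true_eq] at *
      cases hE : w.isEmpty <;> simp [hE, Bool.or_assoc]
    · by_cases hm : w ∈ ps <;> simp [hw, hm]

theorem TMem_build (ps : List (List Char)) (w : List Char) :
    (TMem (ps.foldl trieInsert .nil) w = true) ↔ (w ∈ ps ∧ w ≠ []) := by
  rw [TMem_foldl, TMem_nil_trie]
  cases w <;> simp

theorem length_trieMark (t : PTrie) (suf : List Char) (j : Nat) (reach : List Bool) :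
    (trieMark reach t suf j).length = reach.length := by
  induction suf generalizing t j reach with
  | nil => rfl
  | cons c rest ih =>
    simp only [trieMark]
    cases hf : trieFind t c with
    | none => rfl
    | some p =>
      obtain ⟨e, ch⟩ := p
      rw [ih]
      cases e <;> simp

theorem trieMark_getD (t : PTrie) (suf : List Char) (j : Nat) (reach : List Bool)
    (hlen : j + suf.length < reach.length) (j' : Nat) :
    ((trieMark reach t suf j).getD j' false = true) ↔
      (reach.getD j' false = true ∨
        ∃ w, TMem t w = true ∧ w <+: suf ∧ j' = j + w.length) := by
  induction suf generalizing t j reach with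
  | nil =>
    simp only [trieMark]
    constructor
    · exact fun h => Or.inl h
    · rintro (h | ⟨w, hm, hpre, -⟩)
      · exact h
      · rw [List.prefix_nil.mp hpre] at hm
        exact absurd hm (by simp [show TMem t [] = false from rfl])
  | cons c rest ih =>
    simp only [trieMark]
    cases hf : trieFind t c with
    | none =>
      constructor
      · exact fun h => Or.inl h
      · rintro (h | ⟨w, hm, hpre, -⟩)
        · exact h
        · cases w with
          | nil => rw [show TMem t [] = false from rfl] at hm; exact absurd hm (by simp)
          | cons a as =>
            obtain ⟨hac, -⟩ := List.cons_prefix_cons.mp hpre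
            subst hac
            rw [show TMem t (a :: as) = (match trieFind t a with
                | none => false
                | some (e, ch) => if as.isEmpty then e else TMem ch as) from rfl, hf] at hm
            exact (Bool.false_ne_true hm).elim
    | some p =>
      obtain ⟨e, ch⟩ := p
      have hL : j + rest.length + 1 < reach.length := by
        simp only [List.length_cons] at hlen; omega
      have hlen' : (j + 1) + rest.length < (if e then reach.set (j + 1) true else reach).length := by
        cases e <;> simp <;> omega
      rw [ih ch (j + 1) _ hlen']
      have hget : (if e then reach.set (j + 1) true else reach).getD j' false
          = if e ∧ j' = j + 1 then true else reach.getD j' false := by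
        cases e with
        | false => simp
        | true =>
          rw [if_pos rfl, getD_set_bool reach (j + 1) j' true (by omega)]
          by_cases h : j' = j + 1 <;> simp [h]
      rw [hget]
      constructor
      · rintro (h | ⟨w', hm, hpre, rfl⟩)
        · by_cases hc : e ∧ j' = j + 1
          · refine Or.inr ⟨[c], ?_, ?_, ?_⟩
            · rw [show TMem t [c] = (match trieFind t c with
                  | none => false
                  | some (e, ch) => if ([] : List Char).isEmpty then e else TMem ch []) from rfl,
                hf]
              simpa using hc.1
            · simp
            · simp [hc.2]
          · rw [if_neg hc] at h
            exact Or.inl h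
        · refine Or.inr ⟨c :: w', ?_, ?_, ?_⟩
          · rw [show TMem t (c :: w') = (match trieFind t c with
                | none => false
                | some (e, ch) => if w'.isEmpty then e else TMem ch w') from rfl, hf]
            have hw' : w' ≠ [] := by
              intro h; rw [h] at hm
              exact absurd (by rw [show TMem ch [] = false from rfl] at hm; exact hm) (by simp)
            simp [hw', hm]
          · exact List.cons_prefix_cons.mpr ⟨rfl, hpre⟩
          · simp; omega
      · rintro (h | ⟨w, hm, hpre, rfl⟩)
        · refine Or.inl ?_
          rw [hget] at *
          split
          · rfl
          · exact h
        · cases w with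
          | nil => rw [show TMem t [] = false from rfl] at hm; exact absurd hm (by simp)
          | cons a as =>
            obtain ⟨hac, hpre'⟩ := List.cons_prefix_cons.mp hpre
            subst hac
            rw [show TMem t (a :: as) = (match trieFind t a with
                | none => false
                | some (e, ch) => if as.isEmpty then e else TMem ch as) from rfl, hf] at hm
            cases as with
            | nil =>
              have he : e = true := by simpa using hm
              refine Or.inl ?_
              simp [he]
            | cons b bs =>
              simp only [List.isEmpty_cons, Bool.false_eq_true, if_false] at hm
              refine Or.inr ⟨b :: bs, hm, hpre', by simp; omega⟩

theorem initT_getD (n j : Nat) :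
    (((List.replicate (n + 1) false).set 0 true).getD j false = true) ↔ j = 0 := by
  rw [getD_set_bool _ _ _ _ (by simp)]
  by_cases h : j = 0 <;> simp [h, List.getD_eq_getElem?_getD, List.getElem?_replicate]
  split <;> simp

-- reach after the first k outer iterations of B's per-design loop
def reachTP (t : PTrie) (s : List Char) (k : Nat) : List Bool :=
  (List.range k).foldl
    (fun r i => if r.getD i false then trieMark r t (s.drop i) i else r)
    ((List.replicate (s.length + 1) false).set 0 true)

theorem reachTP_succ (t : PTrie) (s : List Char) (k : Nat) :
    reachTP t s (k + 1)
      = (if (reachTP t s k).getD k false then trieMark (reachTP t s k) t (s.drop k) k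
         else reachTP t s k) := by
  unfold reachTP
  rw [List.range_succ, List.foldl_append, List.foldl_cons, List.foldl_nil]

theorem length_reachTP (t : PTrie) (s : List Char) (k : Nat) :
    (reachTP t s k).length = s.length + 1 := by
  induction k with
  | zero => simp [reachTP]
  | succ k ih =>
    rw [reachTP_succ]
    split
    · rw [length_trieMark, ih]
    · exact ih

theorem reachTP_inv (ps : List (List Char)) (s : List Char)
    (t : PTrie) (ht : ∀ w, (TMem t w = true) ↔ (w ∈ ps ∧ w ≠ []))
    (k : Nat) (hk : k ≤ s.length) :
    ∀ j, j ≤ s.length →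
      (((reachTP t s k).getD j false = true) ↔ ReachP ps s k j) := by
  induction k with
  | zero =>
    intro j hj
    unfold reachTP
    rw [List.range_zero, List.foldl_nil, initT_getD]
    unfold ReachP
    constructor
    · exact fun h => Or.inl h
    · rintro (h | ⟨i, p, hik, -⟩)
      · exact h
      · omega
  | succ k ih =>
    intro j hj
    have ihk := ih (by omega)
    rw [reachTP_succ]
    by_cases hr : (reachTP t s k).getD k false = true
    · rw [if_pos hr]
      have htilk : Til ps (s.take k) := by
        rw [ihk k (by omega)] at hr
        exact (reachP_le ps s k k (by omega) le_rfl).mp hr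
      have hlen : k + (s.drop k).length < (reachTP t s k).length := by
        rw [length_reachTP, List.length_drop]; omega
      rw [trieMark_getD t (s.drop k) k _ hlen j, ihk j hj]
      constructor
      · rintro (h | ⟨w, hm, hpre, rfl⟩)
        · rcases h with rfl | ⟨i, p, hik, hrest⟩
          · exact Or.inl rfl
          · exact Or.inr ⟨i, p, by omega, hrest⟩
        · obtain ⟨hps, hpne⟩ := (ht w).mp hm
          have hj' : k + w.length ≤ s.length := by
            have := List.IsPrefix.length_le hpre
            rw [List.length_drop] at this; omega
          refine Or.inr ⟨k, w, by omega, hps, hpne, rfl, ?_, htilk⟩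
          exact (take_append_iff_prefix_drop s w k (k + w.length) rfl hj').mpr hpre
      · rintro (rfl | ⟨i, p, hik, hps, hpne, hipl, heq, htil⟩)
        · exact Or.inl (Or.inl rfl)
        · by_cases hik' : i < k
          · exact Or.inl (Or.inr ⟨i, p, hik', hps, hpne, hipl, heq, htil⟩)
          · have : i = k := by omega
            subst this
            refine Or.inr ⟨p, (ht p).mpr ⟨hps, hpne⟩, ?_, by omega⟩
            exact (take_append_iff_prefix_drop s p i j hipl hj).mp heq
    · rw [if_neg hr, ihk j hj]
      have hntil : ¬ Til ps (s.take k) := by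
        intro h
        exact hr ((ihk k (by omega)).mpr ((reachP_le ps s k k (by omega) le_rfl).mpr h))
      constructor
      · rintro (rfl | ⟨i, p, hik, hrest⟩)
        · exact Or.inl rfl
        · exact Or.inr ⟨i, p, by omega, hrest⟩
      · rintro (rfl | ⟨i, p, hik, hps, hpne, hipl, heq, htil⟩)
        · exact Or.inl rfl
        · by_cases hik' : i < k
          · exact Or.inr ⟨i, p, hik', hps, hpne, hipl, heq, htil⟩
          · have : i = k := by omega
            subst this
            exact absurd htil hntil

theorem perDesign (ps : List (List Char)) (s : List Char) :
    (dpA ps s).getD s.length false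
      = (reachT (ps.foldl trieInsert .nil) s).getD s.length false := by
  have hA : ((dpA ps s).getD s.length false = true) ↔ Til ps s := by
    have h := dpAP_inv ps s s.length le_rfl s.length le_rfl
    rw [show dpA ps s = dpAP ps s s.length from rfl] at *
    rw [h]
    simp
  have hB : ((reachT (ps.foldl trieInsert .nil) s).getD s.length false = true) ↔ Til ps s := by
    have h := reachTP_inv ps s (ps.foldl trieInsert .nil) (TMem_build ps) s.length le_rfl
      s.length le_rfl
    rw [show reachT (ps.foldl trieInsert .nil) s = reachTP (ps.foldl trieInsert .nil) s s.length
        from rfl] at *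
    rw [h, reachP_le ps s s.length s.length le_rfl le_rfl]
    simp
  rw [Bool.eq_iff_iff, hA, hB]

-- ===== VERDICT (by name: the statement is the Claim_ definition above) =====
theorem day19Q1_spec : Claim_equal_day19Q1 := by
  intro tps designs _dom
  show day19Q1 tps designs = day19Q1_alt tps designs
  unfold day19Q1 day19Q1_alt
  simp only [PySem.List.foldl_append_singleton_eq_map, List.nil_append, List.foldl_map]
  have hroot : tps.foldl (fun t p => trieInsert t p.toList) .nil
      = (tps.map String.toList).foldl trieInsert .nil := by
    rw [List.foldl_map]
  rw [hroot]
  apply PySem.List.foldl_congr_mem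
  intro acc d _
  congr 1
  simp only [PySem.List.pyGetD_natCast]
  rw [perDesign (tps.map String.toList) d.toList]
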